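-- pv_equiv track=rewrite | github.com/alexkein1/info_ege | 0250000020/5.py | func
-- ===== SOURCE A (Python) =====
-- def func(n):
--     n_bin = bin(n)[2:]
--     if n % 2 != 0:
--         new_n_bin = ''
--         for num in n_bin:
--             if int(num) == 0:
--                 new_n_bin += '1'
--             elif int(num) == 1:
--                 new_n_bin += '0'
--         n_bin = new_n_bin
--     bin_r = ''
--     for x in n_bin:
--         if int(x) == 0:
--             bin_r += '00'
--         elif int(x) == 1:
--             bin_r += '11'
--     r = bin_r
--     return int(f'0b{r}', 2)
-- ===== SOURCE B (Python) =====
-- def func(n):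
--     s = bin(n)[2:]
--     u = int(s, 2)
--     if n % 2 != 0:
--         u = (1 << len(s)) - 1 - u   # invert all bits of the representation
--     r = 0
--     bit = 0
--     while u:
--         if u & 1:
--             r += 3 << (2 * bit)     # a doubled 1-bit contributes 2^(2i)+2^(2i+1) = 3*4^i
--         u >>= 1
--         bit += 1
--     return r
-- ===== Notes on version B (the rewrite author's own statement) =====
-- stated objective: alternative
-- what changed: B replaces A's character-by-character string inversion, string doubling and final re-parse by integer bit arithmetic: it inverts the parsed value against an all-ones mask of the same width and spreads each set bit to a pair of adjacent bits in one LSB-to-MSB shift loop, never building a result string.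
import Mathlib
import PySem

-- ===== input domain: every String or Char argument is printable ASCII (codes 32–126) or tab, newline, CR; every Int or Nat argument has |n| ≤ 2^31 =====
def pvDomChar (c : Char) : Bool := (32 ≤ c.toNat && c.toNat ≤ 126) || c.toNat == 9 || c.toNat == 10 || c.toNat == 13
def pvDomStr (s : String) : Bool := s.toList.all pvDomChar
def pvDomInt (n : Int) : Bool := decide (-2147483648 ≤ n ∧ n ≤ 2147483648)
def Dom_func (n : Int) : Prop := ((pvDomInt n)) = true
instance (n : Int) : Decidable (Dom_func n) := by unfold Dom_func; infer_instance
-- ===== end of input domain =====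

-- B replaces A's string inversion/doubling/re-parse by integer bit arithmetic (invert via (1<<len)-1-u, spread bit i to 3<<(2*i)); equivalence proved for n ≥ 0.

-- ===== PORT A =====
-- bin(m)[2:] for m > 0, as a list of chars, MSB first; bin(0)[2:] ('0') handled in pvBinStr.
def pvToBin (m : Nat) : List Char :=
  if m = 0 then []
  else pvToBin (m / 2) ++ [if m % 2 = 1 then '1' else '0']
decreasing_by exact Nat.div_lt_self (Nat.pos_of_ne_zero (by assumption)) (by norm_num)

-- bin(n)[2:] (exact for n ≥ 0; negative n makes the Python raise ValueError later, outside Pre_).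
def pvBinStr (n : Int) : List Char := if n = 0 then ['0'] else pvToBin n.toNat

-- int(s, 2) for a string of '0'/'1' chars (exact on such strings).
def pvParseBin (s : List Char) : Nat :=
  s.foldl (fun a c => 2 * a + (if c = '1' then 1 else 0)) 0

-- the body of A's first loop: "if int(num) == 0: … += '1' elif int(num) == 1: … += '0'"
def pvFlipChunk (num : Char) : List Char :=
  if num = '0' then ['1'] else if num = '1' then ['0'] else []

-- the body of A's second loop: "if int(x) == 0: … += '00' elif int(x) == 1: … += '11'"
def pvDblChunk (x : Char) : List Char :=
  if x = '0' then ['0', '0'] else if x = '1' then ['1', '1'] else []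

def func (n : Int) : Int :=
  let n_bin := pvBinStr n
  let n_bin := if PySem.Int.mod n 2 ≠ 0 then
      n_bin.foldl (fun acc num => acc ++ pvFlipChunk num) []
    else n_bin
  let bin_r := n_bin.foldl (fun acc x => acc ++ pvDblChunk x) []
  -- int(f'0b{r}', 2): Python strips the '0b' prefix and parses the binary digits
  (pvParseBin bin_r : Int)

-- ===== PORT B =====
-- the while-loop of B: while u: if u & 1: r += 3 << (2*bit); u >>= 1; bit += 1
def pvBLoop (u r bit : Nat) : Nat :=
  if u = 0 then r
  else pvBLoop (u / 2) (if u % 2 = 1 then r + 3 * 4 ^ bit else r) (bit + 1)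
decreasing_by exact Nat.div_lt_self (Nat.pos_of_ne_zero (by assumption)) (by norm_num)

def func_alt (n : Int) : Int :=
  let s := pvBinStr n
  let u := pvParseBin s
  -- (1 << len(s)) - 1 - u : u < 2^len(s) here, so Nat subtraction is exact
  let u := if PySem.Int.mod n 2 ≠ 0 then 2 ^ s.length - 1 - u else u
  (pvBLoop u 0 0 : Int)

-- ===== PRECONDITION & SPEC =====
-- Pre_ excludes negative n: there bin(n)[2:] starts with 'b' and both A and B raise ValueError.
def Pre_func (n : Int) : Prop := 0 ≤ n
instance (n : Int) : Decidable (Pre_func n) := by unfold Pre_func; infer_instance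
def pvWitness_func : Int := 6

def Spec_func (n : Int) (out : Int) : Prop := out = func_alt n
instance (n : Int) (out : Int) : Decidable (Spec_func n out) := by unfold Spec_func; infer_instance

-- ===== CLAIM (what is proved, stated in full; the proofs are below) =====
def Claim_equal_func : Prop := ∀ (n : Int), Dom_func n → Pre_func n → Spec_func n (func n)

-- ===== LEMMAS AND PROOFS =====

-- value spread: each set bit i of u contributes 3*4^i
def pvSpread (u : Nat) : Nat :=
  if u = 0 then 0
  else (if u % 2 = 1 then 3 else 0) + 4 * pvSpread (u / 2)
decreasing_by exact Nat.div_lt_self (Nat.pos_of_ne_zero (by assumption)) (by norm_num)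

def IsBin (s : List Char) : Prop := ∀ c ∈ s, c = '0' ∨ c = '1'

theorem isBin_pvToBin (m : Nat) : IsBin (pvToBin m) := by
  induction m using Nat.strong_induction_on with
  | _ m ih =>
    rw [pvToBin]
    split
    · intro c hc; simp at hc
    · intro c hc
      rcases List.mem_append.1 hc with h | h
      · exact ih (m / 2) (Nat.div_lt_self (Nat.pos_of_ne_zero (by assumption)) (by norm_num)) c h
      · simp at h; subst h; split <;> simp

theorem isBin_pvBinStr (n : Int) : IsBin (pvBinStr n) := by
  unfold pvBinStr
  split
  · intro c hc; simp at hc; subst hc; left; rfl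
  · exact isBin_pvToBin _

theorem pvParseBin_append (s : List Char) (c : Char) :
    pvParseBin (s ++ [c]) = 2 * pvParseBin s + (if c = '1' then 1 else 0) := by
  simp [pvParseBin, List.foldl_append]

theorem pvParseBin_lt (s : List Char) : pvParseBin s < 2 ^ s.length := by
  induction s using List.reverseRecOn with
  | nil => simp [pvParseBin]
  | append_singleton s c ih =>
    rw [pvParseBin_append]
    simp only [List.length_append, List.length_cons, List.length_nil, pow_succ]
    split <;> omega

-- A's inversion loop produces the bitwise complement as a value
theorem pvParseBin_flip (s : List Char) (hb : IsBin s) :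
    pvParseBin (s.flatMap pvFlipChunk) = 2 ^ s.length - 1 - pvParseBin s := by
  induction s using List.reverseRecOn with
  | nil => simp [pvParseBin]
  | append_singleton s c ih =>
    have hbs : IsBin s := fun x hx => hb x (List.mem_append.2 (Or.inl hx))
    have hc : c = '0' ∨ c = '1' := hb c (List.mem_append.2 (Or.inr (by simp)))
    have hlt := pvParseBin_lt s
    rw [List.flatMap_append, List.flatMap_singleton]
    rcases hc with hc | hc <;> subst hc
    · rw [show pvFlipChunk '0' = ['1'] from by decide, pvParseBin_append, pvParseBin_append,
        ih hbs]
      simp only [List.length_append, List.length_cons, List.length_nil, pow_succ,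
        show (('0' : Char) = '1') = False from by simp, show (('1' : Char) = '1') = True from by simp,
        ite_false, ite_true]
      obtain ⟨P, hP⟩ : ∃ P, 2 ^ s.length = P := ⟨_, rfl⟩
      rw [hP] at hlt ⊢
      omega
    · rw [show pvFlipChunk '1' = ['0'] from by decide, pvParseBin_append, pvParseBin_append,
        ih hbs]
      simp only [List.length_append, List.length_cons, List.length_nil, pow_succ,
        show (('0' : Char) = '1') = False from by simp, show (('1' : Char) = '1') = True from by simp,
        ite_false, ite_true]
      obtain ⟨P, hP⟩ : ∃ P, 2 ^ s.length = P := ⟨_, rfl⟩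
      rw [hP] at hlt ⊢
      omega

theorem isBin_flip (s : List Char) (hb : IsBin s) : IsBin (s.flatMap pvFlipChunk) := by
  intro x hx
  rcases List.mem_flatMap.1 hx with ⟨c, hc, hxc⟩
  rcases hb c hc with h | h <;> subst h <;> simp [pvFlipChunk] at hxc <;> simp [hxc]

theorem pvSpread_step (u b : Nat) (hb : b ≤ 1) :
    pvSpread (2 * u + b) = 4 * pvSpread u + 3 * b := by
  rcases Nat.eq_zero_or_pos (2 * u + b) with h | h
  · have hu : u = 0 := by omega
    have hb0 : b = 0 := by omega
    subst hu; subst hb0; simp [pvSpread]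
  · rw [pvSpread]
    have hne : ¬ (2 * u + b = 0) := by omega
    rw [if_neg hne]
    have h2 : (2 * u + b) / 2 = u := by omega
    have h3 : (2 * u + b) % 2 = b := by omega
    rw [h2, h3]
    interval_cases b <;> simp <;> ring

-- A's doubling loop, as a value, is pvSpread of the parsed value
theorem pvParseBin_double (s : List Char) (hb : IsBin s) :
    pvParseBin (s.flatMap pvDblChunk) = pvSpread (pvParseBin s) := by
  induction s using List.reverseRecOn with
  | nil => simp [pvParseBin, pvSpread]
  | append_singleton s c ih =>
    have hbs : IsBin s := fun x hx => hb x (List.mem_append.2 (Or.inl hx))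
    have hc : c = '0' ∨ c = '1' := hb c (List.mem_append.2 (Or.inr (by simp)))
    rw [List.flatMap_append, List.flatMap_singleton]
    rcases hc with hc | hc <;> subst hc
    · rw [show pvDblChunk '0' = ['0', '0'] from by decide,
        show (s.flatMap pvDblChunk) ++ ['0', '0'] = ((s.flatMap pvDblChunk) ++ ['0']) ++ ['0'] from by simp,
        pvParseBin_append, pvParseBin_append, ih hbs, pvParseBin_append]
      simp only [show (('0' : Char) = '1') = False from by simp, ite_false]
      rw [pvSpread_step _ 0 (by omega)]
      ring
    · rw [show pvDblChunk '1' = ['1', '1'] from by decide,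
        show (s.flatMap pvDblChunk) ++ ['1', '1'] = ((s.flatMap pvDblChunk) ++ ['1']) ++ ['1'] from by simp,
        pvParseBin_append, pvParseBin_append, ih hbs, pvParseBin_append]
      simp only [show (('1' : Char) = '1') = True from by simp, ite_true]
      rw [pvSpread_step _ 1 (by omega)]
      ring

theorem pvBLoop_eq (u : Nat) : ∀ r bit, pvBLoop u r bit = r + 4 ^ bit * pvSpread u := by
  induction u using Nat.strong_induction_on with
  | _ u ih =>
    intro r bit
    rw [pvBLoop, pvSpread]
    by_cases h : u = 0
    · simp [h]
    · rw [if_neg h, if_neg h, ih (u / 2) (Nat.div_lt_self (Nat.pos_of_ne_zero h) (by norm_num))]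
      split <;> simp [pow_succ] <;> ring

-- ===== VERDICT (by name: the statement is the Claim_ definition above) =====
theorem func_spec : Claim_equal_func := by
  intro n _ _
  unfold Spec_func func func_alt
  have hb := isBin_pvBinStr n
  simp only []
  rw [PySem.List.foldl_append_eq_flatMap, List.nil_append, pvBLoop_eq]
  by_cases hm : PySem.Int.mod n 2 ≠ 0
  · rw [if_pos hm, if_pos hm, PySem.List.foldl_append_eq_flatMap, List.nil_append,
      pvParseBin_double _ (isBin_flip _ hb), pvParseBin_flip _ hb]
    simp
  · rw [if_neg hm, if_neg hm, pvParseBin_double _ hb]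
    simp
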